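-- pv_equiv track=rewrite | github.com/benbrastmckie/ModelChecker | Code/src/new_checker/OLD/syntax.py | main_op_index
-- ===== SOURCE A (Python) =====
-- def main_op_index(tokenized_expression, unary_operators_names):
--     """
--     given an expression with complexity > 0, finds the index of the main operator.
--     Starting after the expression's initial parenthesis, the point
--     at which the number of left parentheses equals the number of right is the
--     first expression (as it is closed there)
--     ASSUMES FIRST CHAR IS LEFT PARENTH. IF NOT CASE, EQN PROLLY SHOULDN'T BE HERE
--     >>> main_op_index(tokenize('(A /wedge (B /vee C))'))
--     2
--
--     >>> main_op_index(tokenize('((A /vee B) /wedge C)'))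
--     6
--
--     >>> main_op_index(tokenize('((A /operator ((C /operator D) /operator F)) /operator E)'))
--     14
--
--     >>> main_op_index(tokenize('((/neg A /vee B) /wedge C)'))
--     7
--
--     >>> main_op_index(tokenize('((A \\op (B \\op C)) \\op (D \\op E))'))
--     10
--     """
--     left_parentheses = 0
--     right_parentheses = 0
--     if tokenized_expression[0] != "(":
--         raise ValueError(tokenized_expression, "Error: parentheses unmatched")
--     # [1:] to exclude the left parens (thus complexity) of the main operator
--     for i, token in enumerate(tokenized_expression[1:]):
--         if token == "(":
--             left_parentheses += 1
--         elif token == ")":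
--             right_parentheses += 1
--         elif ( # this elif is necessary—e.g. token input to parse is
--                 # ['(', '\\neg', 'B', '\\wedge', '\\neg', 'D', ')']
--                 # (it thinks B is an operator)
--             token in unary_operators_names
--         ):  # ignore this case since this func is for binary complexity
--             continue
--         if left_parentheses == right_parentheses:
--             # +1 bc list is [1:] and we want original index, and +1 bc it's next
--             # elem where the main op is
--             return i + 2
--     raise ValueError(
--         tokenized_expression,
--         f"Looks like nothing was passed into main_op_index ({tokenized_expression})",
--     )
-- ===== SOURCE B (Python) =====
-- def main_op_index(tokenized_expression, unary_operators_names):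
--     if tokenized_expression[0] != "(":
--         raise ValueError(tokenized_expression, "Error: parentheses unmatched")
--     rest = tokenized_expression[1:]
--     # stage 1: materialize the full prefix-balance table over the tail
--     balances = []
--     depth = 0
--     for t in rest:
--         if t == "(":
--             depth += 1
--         elif t == ")":
--             depth -= 1
--         balances.append(depth)
--     # stage 2: first checkpoint (paren or non-unary token) whose prefix is balanced
--     for j, (b, t) in enumerate(zip(balances, rest)):
--         if b == 0 and (t == "(" or t == ")" or t not in unary_operators_names):
--             return j + 2
--     raise ValueError(
--         tokenized_expression,
--         f"Looks like nothing was passed into main_op_index ({tokenized_expression})",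
--     )
-- ===== Notes on version B (the rewrite author's own statement) =====
-- stated objective: alternative
-- what changed: B replaces A's single fused loop with skip-continue and two counters by two staged passes: it first materializes the complete prefix-balance table of the tail, then searches that table for the first checkpoint token with balance zero, with the skip expressed as a positive conjunct of the search predicate instead of a continue.
import Mathlib
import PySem

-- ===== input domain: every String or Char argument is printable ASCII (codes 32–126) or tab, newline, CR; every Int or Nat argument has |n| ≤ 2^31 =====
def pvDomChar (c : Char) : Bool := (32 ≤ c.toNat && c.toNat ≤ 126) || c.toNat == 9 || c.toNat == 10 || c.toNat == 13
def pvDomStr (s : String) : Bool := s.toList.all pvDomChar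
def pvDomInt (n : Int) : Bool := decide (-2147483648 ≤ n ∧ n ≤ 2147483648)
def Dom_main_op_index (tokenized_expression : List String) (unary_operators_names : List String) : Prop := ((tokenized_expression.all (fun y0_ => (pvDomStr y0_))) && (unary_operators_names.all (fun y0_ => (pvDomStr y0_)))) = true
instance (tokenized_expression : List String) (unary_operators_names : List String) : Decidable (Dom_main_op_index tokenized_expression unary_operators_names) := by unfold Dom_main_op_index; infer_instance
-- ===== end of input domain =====

-- ===== PORT A =====
-- B replaces A's fused skip-continue loop by two staged passes: build the prefix-balance table, then search it (objective: alternative decomposition, same cost).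
-- loop of A: enumerate over tokenized_expression[1:] with two counters; returns some (i+2) at the first balance point, none = the final ValueError
def mainOpLoopA (unary : List String) : List String → Int → Int → Int → Option Int
  | [], _, _, _ => none
  | t :: rest, i, lp, rp =>
    let lp' : Int := if t = "(" then lp + 1 else lp
    let rp' : Int := if t ≠ "(" ∧ t = ")" then rp + 1 else rp
    if t ≠ "(" ∧ t ≠ ")" ∧ t ∈ unary then
      mainOpLoopA unary rest (i + 1) lp' rp'
    else if lp' = rp' then some (i + 2)
    else mainOpLoopA unary rest (i + 1) lp' rp'

-- raising paths (empty list: IndexError; first token not "("; exhausted loop: ValueError) are excluded by Pre_; the port returns 0 there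
def main_op_index (tokenized_expression : List String) (unary_operators_names : List String) : Int :=
  match tokenized_expression with
  | [] => 0
  | t0 :: rest =>
    if t0 ≠ "(" then 0
    else (mainOpLoopA unary_operators_names rest 0 0 0).getD 0

-- ===== PORT B =====
-- stage 1 of B: the full prefix-balance table of the tail (one entry per token)
def balancesB : List String → Int → List Int
  | [], _ => []
  | t :: rest, d =>
    let d' : Int := if t = "(" then d + 1 else if t = ")" then d - 1 else d
    d' :: balancesB rest d'

-- stage 2 of B: search the zipped (balance, token) table for the first balanced checkpoint
def findMainB (unary : List String) : List (Int × String) → Int → Option Int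
  | [], _ => none
  | (b, t) :: rest, j =>
    if b = 0 ∧ (t = "(" ∨ t = ")" ∨ t ∉ unary) then some (j + 2)
    else findMainB unary rest (j + 1)

def main_op_index_alt (tokenized_expression : List String) (unary_operators_names : List String) : Int :=
  match tokenized_expression with
  | [] => 0
  | t0 :: rest =>
    if t0 ≠ "(" then 0
    else (findMainB unary_operators_names ((balancesB rest 0).zip rest) 0).getD 0

-- ===== PRECONDITION & SPEC =====
-- Pre_ holds exactly where Python A returns: first token "(" and, past it, some token that is a
-- parenthesis or a non-unary token at which the parentheses seen so far balance (otherwise A raises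
-- IndexError on [] or one of its two ValueErrors).
def Pre_main_op_index (tokenized_expression : List String) (unary_operators_names : List String) : Prop :=
  tokenized_expression.head? = some "(" ∧
  ∃ j ∈ List.range (tokenized_expression.length - 1),
    (let rest := tokenized_expression.drop 1
     (rest.getD j "" = "(" ∨ rest.getD j "" = ")" ∨ rest.getD j "" ∉ unary_operators_names) ∧
     (rest.take (j + 1)).count "(" = (rest.take (j + 1)).count ")")
instance (tokenized_expression : List String) (unary_operators_names : List String) : Decidable (Pre_main_op_index tokenized_expression unary_operators_names) := by unfold Pre_main_op_index; infer_instance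

def pvWitness_main_op_index : List String × List String := (["(", "A", "\\wedge", "B", ")"], ["\\neg"])

def Spec_main_op_index (tokenized_expression : List String) (unary_operators_names : List String) (out : Int) : Prop := out = main_op_index_alt tokenized_expression unary_operators_names
instance (tokenized_expression : List String) (unary_operators_names : List String) (out : Int) : Decidable (Spec_main_op_index tokenized_expression unary_operators_names out) := by unfold Spec_main_op_index; infer_instance

-- ===== CLAIM (what is proved, stated in full; the proofs are below) =====
def Claim_equal_main_op_index : Prop := ∀ (tokenized_expression : List String) (unary_operators_names : List String), Dom_main_op_index tokenized_expression unary_operators_names → Pre_main_op_index tokenized_expression unary_operators_names → Spec_main_op_index tokenized_expression unary_operators_names (main_op_index tokenized_expression unary_operators_names)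

-- ===== LEMMAS AND PROOFS =====

-- A's counter loop computes the same option as B's search of the balance table started at depth lp - rp
theorem loopA_eq_findB (unary : List String) (toks : List String) :
    ∀ (i lp rp : Int),
      mainOpLoopA unary toks i lp rp = findMainB unary ((balancesB toks (lp - rp)).zip toks) i := by
  induction toks with
  | nil => intro i lp rp; rfl
  | cons t rest ih =>
    intro i lp rp
    simp only [mainOpLoopA, balancesB, List.zip_cons_cons, findMainB]
    by_cases h1 : t = "(" <;> by_cases h2 : t = ")" <;> by_cases h3 : t ∈ unary <;>
      simp [h1, h2, h3] <;>
      first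
        | exact ih _ _ _
        | (split_ifs <;>
            first
              | rfl
              | omega
              | (rw [ih]; try ring_nf)
              | (exfalso; omega))

-- total agreement of the two ports (the Pre_ hypothesis of the claim confines it to the inputs where the Python A returns)
theorem ports_agree (te un : List String) : main_op_index te un = main_op_index_alt te un := by
  cases te with
  | nil => rfl
  | cons t0 rest =>
    by_cases h0 : t0 = "("
    · simp only [main_op_index, main_op_index_alt, h0]
      rw [loopA_eq_findB un rest 0 0 0]
      norm_num
    · simp [main_op_index, main_op_index_alt, h0]

-- ===== VERDICT (by name: the statement is the Claim_ definition above) =====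
theorem main_op_index_spec : Claim_equal_main_op_index := by
  intro te un _ _
  unfold Spec_main_op_index
  exact ports_agree te un
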